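-- pv_equiv track=rewrite | github.com/ilanazane/leetcode | 2396StrictlyPalindromicNumber.py | isStrictlyPalindrome
-- ===== SOURCE A (Python) =====
-- def convertToBinary(n: int) -> list[str]:
--     # get end range
--     b = n - 2
--
--     nums_list = []
--
--     for i in range(2, b + 1):
--         nums = ""
--         input = n
--
--         # calculate binary strings
--         while input:
--             input, r = divmod(input, i)
--             nums += str(r)
--         nums_list.append("".join(reversed(nums)))
--
--     return nums_list
--
-- def isStrictlyPalindrome(n: int) -> bool:
--
--     binary_list = convertToBinary(n)
--
--     reversed_binary_list = []
--
--     # reverse every binary number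
--     for i in binary_list:
--         reverse_str = "".join(reversed(i))
--         reversed_binary_list.append(reverse_str)
--
--     # if strictly palindromic both lists will be equal
--     if reversed_binary_list == binary_list:
--         return True
--     # any differences means it is not strictly palindromic
--     else:
--         return False
-- ===== SOURCE B (Python) =====
-- def isStrictlyPalindrome(n: int) -> bool:
--     # No integer n >= 4 is strictly palindromic: in base n - 2 the number n is
--     # written "12" (or "100" for n = 4), which is never a palindrome.  For
--     # n < 4 the base range 2..n-2 is empty, so the condition holds vacuously.
--     return n < 4
-- ===== Notes on version B (the rewrite author's own statement) =====
-- stated objective: faster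
-- what changed: Replaced the per-base digit-expansion-and-palindrome-check loop by the closed form n < 4, using the fact that no integer of at least four is strictly palindromic (its base n-2 representation is never a palindrome) while below four the base range is empty.
import Mathlib
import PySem

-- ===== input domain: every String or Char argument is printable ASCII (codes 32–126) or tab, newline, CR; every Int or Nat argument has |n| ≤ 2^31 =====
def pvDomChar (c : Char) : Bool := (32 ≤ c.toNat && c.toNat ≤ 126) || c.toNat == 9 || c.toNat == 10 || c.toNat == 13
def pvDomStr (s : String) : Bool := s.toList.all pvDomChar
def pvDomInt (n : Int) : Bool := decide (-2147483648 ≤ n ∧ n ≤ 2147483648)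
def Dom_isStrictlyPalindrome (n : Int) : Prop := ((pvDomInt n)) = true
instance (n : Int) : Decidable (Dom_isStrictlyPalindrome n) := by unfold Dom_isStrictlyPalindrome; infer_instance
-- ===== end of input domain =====

-- B replaces A's per-base digit expansion and palindrome comparison by the closed form n < 4
-- (no n ≥ 4 is strictly palindromic); objective: faster.

-- ===== PORT A =====
-- the `while input:` loop; fuel bounds the number of iterations (n.toNat+1 suffices on every
-- input the surrounding range makes reachable: there input = n ≥ 4 and the quotient shrinks).
-- `divmod(input, i)` is ported as (floordiv, mod), exact since every i drawn from range(2, b+1)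
-- satisfies i ≥ 2 ≠ 0.
def pvDigitsLoop : Nat → Int → Int → String → String
  | 0, _, _, nums => nums
  | fuel + 1, i, input, nums =>
    if input ≠ 0 then
      pvDigitsLoop fuel i (PySem.Int.floordiv input i)
        (nums ++ PySem.Int.toStr (PySem.Int.mod input i))
    else nums

def pvConvertToBinary (n : Int) : List String :=
  let b := n - 2
  (PySem.List.pyRange 2 (b + 1) 1).foldl
    (fun nums_list i =>
      let nums := pvDigitsLoop (n.toNat + 1) i n ""
      nums_list ++ [String.mk nums.toList.reverse])
    []

def isStrictlyPalindrome (n : Int) : Bool :=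
  let binary_list := pvConvertToBinary n
  let reversed_binary_list :=
    binary_list.foldl (fun acc i => acc ++ [String.mk i.toList.reverse]) []
  if reversed_binary_list = binary_list then true else false

-- ===== PORT B =====
def isStrictlyPalindrome_alt (n : Int) : Bool := decide (n < 4)

-- ===== PRECONDITION & SPEC =====
def Spec_isStrictlyPalindrome (n : Int) (out : Bool) : Prop := out = isStrictlyPalindrome_alt n
instance (n : Int) (out : Bool) : Decidable (Spec_isStrictlyPalindrome n out) := by unfold Spec_isStrictlyPalindrome; infer_instance

-- ===== CLAIM (what is proved, stated in full; the proofs are below) =====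
def Claim_equal_isStrictlyPalindrome : Prop := ∀ (n : Int), Dom_isStrictlyPalindrome n → Spec_isStrictlyPalindrome n (isStrictlyPalindrome n)

-- ===== LEMMAS AND PROOFS =====

-- appending one mapped element per step is mapping
theorem pv_foldl_push {α β : Type} (f : α → β) (l : List α) (acc : List β) :
    l.foldl (fun a x => a ++ [f x]) acc = acc ++ l.map f := by
  induction l generalizing acc with
  | nil => simp
  | cons x xs ih => simp [List.foldl_cons, ih]

-- if mapping g over a list leaves it unchanged, g fixes every element
theorem pv_map_self {α : Type} (g : α → α) (l : List α) (h : l.map g = l) :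
    ∀ x ∈ l, g x = x := by
  induction l with
  | nil => simp
  | cons y ys ih =>
    simp only [List.map_cons, List.cons.injEq] at h
    intro x hx
    rcases List.mem_cons.mp hx with rfl | hx
    · exact h.1
    · exact ih h.2 x hx

-- the digit string of n in base n-2, for n ≥ 5
theorem pv_digits_last (n : Int) (h5 : 5 ≤ n) :
    pvDigitsLoop (n.toNat + 1) (n - 2) n "" = "21" := by
  obtain ⟨k, hk⟩ : ∃ k, n.toNat + 1 = k + 3 := ⟨n.toNat - 2, by omega⟩
  have hb : (0 : Int) < n - 2 := by omega
  have hq1 : PySem.Int.floordiv n (n - 2) = 1 := by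
    rw [PySem.Int.floordiv_eq_iff_of_pos hb]; constructor <;> omega
  have hr1 : PySem.Int.mod n (n - 2) = 2 := by
    have := PySem.Int.floordiv_mul_add_mod n (n - 2)
    rw [hq1] at this; omega
  have hq2 : PySem.Int.floordiv 1 (n - 2) = 0 := by
    rw [PySem.Int.floordiv_eq_iff_of_pos hb]; constructor <;> omega
  have hr2 : PySem.Int.mod 1 (n - 2) = 1 := by
    have := PySem.Int.floordiv_mul_add_mod 1 (n - 2)
    rw [hq2] at this; omega
  rw [hk]
  rw [pvDigitsLoop, if_pos (by omega : n ≠ 0), hq1, hr1]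
  rw [pvDigitsLoop, if_pos (by omega : (1 : Int) ≠ 0), hq2, hr2]
  rw [pvDigitsLoop, if_neg (by omega : ¬ (0 : Int) ≠ 0)]
  rfl

theorem pv_not_palindromic (n : Int) (h5 : 5 ≤ n) : isStrictlyPalindrome n = false := by
  unfold isStrictlyPalindrome pvConvertToBinary
  simp only [pv_foldl_push, List.nil_append]
  set f : Int → String :=
    fun i => String.mk (pvDigitsLoop (n.toNat + 1) i n "").toList.reverse with hf
  set g : String → String := fun s => String.mk s.toList.reverse with hg
  rw [if_neg]
  intro heq
  have hmem : (n - 2) ∈ PySem.List.pyRange 2 (n - 2 + 1) 1 := by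
    rw [PySem.List.mem_pyRange_one]; omega
  have hfm : f (n - 2) ∈ (PySem.List.pyRange 2 (n - 2 + 1) 1).map f :=
    List.mem_map_of_mem hmem
  have hself : g (f (n - 2)) = f (n - 2) :=
    pv_map_self g _ heq _ hfm
  have hfv : f (n - 2) = "12" := by
    rw [hf]; simp only [pv_digits_last n h5]; rfl
  rw [hfv] at hself
  exact absurd hself (by decide)

-- ===== VERDICT (by name: the statement is the Claim_ definition above) =====
theorem isStrictlyPalindrome_spec : Claim_equal_isStrictlyPalindrome := by
  intro n _hdom
  unfold Spec_isStrictlyPalindrome isStrictlyPalindrome_alt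
  by_cases h4 : n < 4
  · -- empty base range: both sides true
    have hnil : PySem.List.pyRange 2 (n - 2 + 1) 1 = [] :=
      PySem.List.pyRange_one_eq_nil (by omega)
    simp [isStrictlyPalindrome, pvConvertToBinary, hnil, h4]
  · by_cases h5 : 5 ≤ n
    · simp [pv_not_palindromic n h5, h4]
    · have : n = 4 := by omega
      subst this; decide
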